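-- pv_equiv track=rewrite | github.com/andi611/Conditional-SeqGAN-Tensorflow | src/test.py | _clip_count
-- ===== SOURCE A (Python) =====
-- def _clip_count(cand_d, ref_ds):
-- 	"""Count the clip count for each ngram considering all references"""
-- 	count = 0
-- 	for m in cand_d.keys():
-- 		m_w = cand_d[m]
-- 		m_max = 0
-- 		for ref in ref_ds:
-- 			if m in ref:
-- 				m_max = max(m_max, ref[m])
-- 		m_w = min(m_w, m_max)
-- 		count += m_w
-- 	return count
-- ===== SOURCE B (Python) =====
-- def _clip_count(cand_d, ref_ds):
--     """Count the clip count for each ngram considering all references"""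
--     ref_max = {}
--     for ref in ref_ds:
--         for k, v in ref.items():
--             ref_max[k] = max(ref_max.get(k, 0), v)
--     return sum(min(v, ref_max.get(m, 0)) for m, v in cand_d.items())
-- ===== Notes on version B (the rewrite author's own statement) =====
-- stated objective: faster
-- what changed: Inverts the loop nesting: precomputes one per-key cross-reference maximum table (ref_max) in a single pass over all references, then a single pass over the candidate items, instead of rescanning every reference dict for each candidate ngram.
import Mathlib
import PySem

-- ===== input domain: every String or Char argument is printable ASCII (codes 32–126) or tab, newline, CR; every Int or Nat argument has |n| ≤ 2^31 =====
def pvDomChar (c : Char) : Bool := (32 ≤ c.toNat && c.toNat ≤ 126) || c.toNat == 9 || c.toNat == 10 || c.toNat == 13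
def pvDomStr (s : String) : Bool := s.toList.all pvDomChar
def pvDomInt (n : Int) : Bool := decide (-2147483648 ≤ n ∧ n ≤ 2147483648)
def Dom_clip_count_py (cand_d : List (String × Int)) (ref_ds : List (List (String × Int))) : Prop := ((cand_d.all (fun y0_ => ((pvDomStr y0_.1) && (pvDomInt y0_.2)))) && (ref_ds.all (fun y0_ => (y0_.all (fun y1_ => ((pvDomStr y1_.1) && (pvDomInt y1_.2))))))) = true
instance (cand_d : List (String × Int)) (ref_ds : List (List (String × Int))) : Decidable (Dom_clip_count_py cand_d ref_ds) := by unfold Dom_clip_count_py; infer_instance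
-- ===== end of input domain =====

-- B inverts the loop nesting: it builds one per-key max table over all references, then a single pass over candidate items (objective: faster, constant-factor).

-- ===== PORT A =====
-- literal port of A: for each candidate key, rescan every reference dict
def clip_count_py (cand_d : List (String × Int)) (ref_ds : List (List (String × Int))) : Int :=
  let cd := PySem.Dict.ofList cand_d
  let refs := ref_ds.map (fun r => PySem.Dict.ofList r)
  cd.keys.foldl (fun count m =>
    let m_w := cd.getD m 0
    let m_max := refs.foldl (fun m_max ref =>
      if ref.contains m then max m_max (ref.getD m 0) else m_max) 0
    count + min m_w m_max) 0

-- ===== PORT B =====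
-- B helper: one pass over all reference items, keeping the running per-key maximum
def pvRefMax (ref_ds : List (List (String × Int))) : PySem.Dict String Int :=
  ref_ds.foldl (fun acc ref =>
    (PySem.Dict.ofList ref).items.foldl
      (fun acc p => acc.insert p.1 (max (acc.getD p.1 0) p.2)) acc)
    PySem.Dict.empty

def clip_count_py_alt (cand_d : List (String × Int)) (ref_ds : List (List (String × Int))) : Int :=
  let rm := pvRefMax ref_ds
  (PySem.Dict.ofList cand_d).items.foldl (fun s p => s + min p.2 (rm.getD p.1 0)) 0

-- ===== PRECONDITION & SPEC =====
def Spec_clip_count_py (cand_d : List (String × Int)) (ref_ds : List (List (String × Int))) (out : Int) : Prop := out = clip_count_py_alt cand_d ref_ds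
instance (cand_d : List (String × Int)) (ref_ds : List (List (String × Int))) (out : Int) : Decidable (Spec_clip_count_py cand_d ref_ds out) := by unfold Spec_clip_count_py; infer_instance

-- ===== CLAIM (what is proved, stated in full; the proofs are below) =====
def Claim_equal_clip_count_py : Prop := ∀ (cand_d : List (String × Int)) (ref_ds : List (List (String × Int))), Dom_clip_count_py cand_d ref_ds → Spec_clip_count_py cand_d ref_ds (clip_count_py cand_d ref_ds)

-- ===== LEMMAS AND PROOFS =====

-- a fold that never matches key m leaves the accumulator unchanged
theorem pv_fold_noMatch (ps : List (String × Int)) (a : Int) (m : String)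
    (h : ∀ p ∈ ps, p.1 ≠ m) :
    ps.foldl (fun x p => if p.1 = m then max x p.2 else x) a = a := by
  induction ps generalizing a with
  | nil => rfl
  | cons q rest ih =>
    simp only [List.foldl_cons]
    rw [if_neg (h q (List.mem_cons_self))]
    exact ih a (fun p hp => h p (List.mem_cons_of_mem _ hp))

-- the value of key m after the per-reference insert loop, as a scalar fold
theorem pv_getD_itemsFold (ps : List (String × Int)) (acc : PySem.Dict String Int) (m : String) :
    (ps.foldl (fun acc p => acc.insert p.1 (max (acc.getD p.1 0) p.2)) acc).getD m 0
      = ps.foldl (fun x p => if p.1 = m then max x p.2 else x) (acc.getD m 0) := by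
  induction ps generalizing acc with
  | nil => rfl
  | cons q rest ih =>
    simp only [List.foldl_cons]
    rw [ih]
    by_cases hq : q.1 = m
    · rw [if_pos hq, ← hq, PySem.Dict.getD_insert_self]
    · rw [if_neg hq, PySem.Dict.getD_insert_of_ne _ _ _ (fun h => hq h.symm)]

-- the scalar fold over an association list with distinct keys equals A's
-- "if contains then max" update on the corresponding dict
theorem pv_assocFold (ps : List (String × Int)) (a : Int) (m : String)
    (hn : (ps.map (·.1)).Nodup) :
    ps.foldl (fun x p => if p.1 = m then max x p.2 else x) a
      = if (PySem.Dict.mk ps).contains m then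
          max a ((PySem.Dict.mk ps).getD m 0) else a := by
  induction ps generalizing a with
  | nil => simp [PySem.Dict.contains_mk]
  | cons q rest ih =>
    obtain ⟨k, v⟩ := q
    simp only [List.map_cons, List.nodup_cons] at hn
    simp only [List.foldl_cons]
    by_cases hk : k = m
    · subst hk
      rw [if_pos rfl]
      rw [pv_fold_noMatch rest (max a v) k
        (fun p hp he => hn.1 (he ▸ List.mem_map_of_mem hp))]
      have hc : (PySem.Dict.mk ((k, v) :: rest)).contains k = true := by
        simp [PySem.Dict.contains_mk]
      rw [if_pos hc, PySem.Dict.getD_eq_get?_getD, PySem.Dict.get?_mk_cons]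
      simp
    · rw [if_neg hk, ih a hn.2]
      have hcc : (PySem.Dict.mk ((k, v) :: rest)).contains m
          = (PySem.Dict.mk rest).contains m := by
        simp [PySem.Dict.contains_mk, beq_iff_eq, hk]
      have hgd : (PySem.Dict.mk ((k, v) :: rest)).getD m 0
          = (PySem.Dict.mk rest).getD m 0 := by
        rw [PySem.Dict.getD_eq_get?_getD, PySem.Dict.get?_mk_cons,
          if_neg (by simpa using hk), ← PySem.Dict.getD_eq_get?_getD]
      rw [hcc, hgd]

-- pvRefMax's entry at m equals A's inner fold over the references
theorem pv_refMax_getD (rds : List (List (String × Int))) (acc : PySem.Dict String Int) (m : String) :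
    (rds.foldl (fun acc ref =>
        (PySem.Dict.ofList ref).items.foldl
          (fun acc p => acc.insert p.1 (max (acc.getD p.1 0) p.2)) acc) acc).getD m 0
      = rds.foldl (fun mm ref =>
          if (PySem.Dict.ofList ref).contains m then
            max mm ((PySem.Dict.ofList ref).getD m 0) else mm) (acc.getD m 0) := by
  induction rds generalizing acc with
  | nil => rfl
  | cons r rest ih =>
    simp only [List.foldl_cons]
    rw [ih, pv_getD_itemsFold,
      pv_assocFold _ _ _ (by simpa [PySem.Dict.keys] using PySem.Dict.nodup_keys_ofList r)]

-- ===== VERDICT (by name: the statement is the Claim_ definition above) =====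
theorem clip_count_py_spec : Claim_equal_clip_count_py := by
  intro cand_d ref_ds _
  unfold Spec_clip_count_py clip_count_py clip_count_py_alt pvRefMax
  simp only [PySem.Dict.keys, List.foldl_map]
  apply PySem.List.foldl_congr_mem
  intro acc p hp
  have hnd : (PySem.Dict.ofList cand_d).keys.Nodup := PySem.Dict.nodup_keys_ofList cand_d
  have hv : (PySem.Dict.ofList cand_d).getD p.1 0 = p.2 :=
    PySem.Dict.getD_of_mem_items _ (by exact hp) hnd 0
  rw [hv, pv_refMax_getD, PySem.Dict.getD_empty]
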